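-- pv_equiv track=rewrite | github.com/metaSATOKEN/IFG-Project-Realizing | src/resolve_swap_paths.py | resolve_gates
-- ===== SOURCE A (Python) =====
-- from typing import Dict, List, Tuple
--
-- def emit_swap(
--     u: str,
--     v: str,
--     node_to_idx: Dict[str, int],
--     pos_to_state: Dict[str, str],
--     state_to_pos: Dict[str, str],
-- ) -> str:
--     idx_u = node_to_idx[u]
--     idx_v = node_to_idx[v]
--     state_u = pos_to_state[u]
--     state_v = pos_to_state[v]
--     pos_to_state[u], pos_to_state[v] = state_v, state_u
--     state_to_pos[state_u], state_to_pos[state_v] = v, u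
--     return f"SWAP q[{idx_u}], q[{idx_v}];"
--
-- def resolve_gates(gates: List[Dict[str, str]], path_matrix: Dict[str, Dict[str, List[str]]],
--                   node_to_idx: Dict[str, int]) -> List[str]:
--     node_to_idx = node_to_idx.copy()
--     # initialize occupancy maps
--     pos_to_state = {node: node for node in node_to_idx}
--     state_to_pos = {node: node for node in node_to_idx}
--
--     lines: List[str] = ["OPENQASM 2.0;", "include \"qelib1.inc\";", "qreg q[16];", ""]
--     for gate in gates:
--         gtype = gate.get("gate")
--         if gtype != "CX":
--             continue
--         q1 = gate.get("q1")
--         q2 = gate.get("q2")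
--         if q1 is None or q2 is None:
--             continue
--         start = state_to_pos.get(q1)
--         end = state_to_pos.get(q2)
--         if start is None or end is None:
--             continue
--         path = path_matrix[start][end]
--         lines.append(f"// {q1} ↔ {q2} via {' → '.join(path)} (SWAPs: {max(len(path)-2, 0)})")
--         # move q1 along path except final hop
--         for i in range(len(path) - 2):
--             lines.append(emit_swap(path[i], path[i + 1], node_to_idx, pos_to_state, state_to_pos))
--         ctrl_idx = node_to_idx[path[-2]] if len(path) > 1 else node_to_idx[start]
--         targ_idx = node_to_idx[path[-1]]
--         lines.append(f"CX q[{ctrl_idx}], q[{targ_idx}];")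
--         # restore positions
--         for i in reversed(range(len(path) - 2)):
--             lines.append(emit_swap(path[i], path[i + 1], node_to_idx, pos_to_state, state_to_pos))
--         lines.append("")
--     return lines
-- ===== SOURCE B (Python) =====
-- from typing import Dict, List
--
-- def resolve_gates(gates: List[Dict[str, str]], path_matrix: Dict[str, Dict[str, List[str]]],
--                   node_to_idx: Dict[str, int]) -> List[str]:
--     # Stateless emitter: the forward swaps are undone by the reversed swaps, so the
--     # occupancy maps of the original are always the identity and never affect output.
--     def block(gate: Dict[str, str]) -> List[str]:
--         if gate.get("gate") != "CX":
--             return []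
--         q1 = gate.get("q1")
--         q2 = gate.get("q2")
--         if q1 is None or q2 is None or q1 not in node_to_idx or q2 not in node_to_idx:
--             return []
--         path = path_matrix[q1][q2]
--         swaps = [f"SWAP q[{node_to_idx[a]}], q[{node_to_idx[b]}];"
--                  for a, b in zip(path, path[1:-1])]
--         ctrl = node_to_idx[path[-2]] if len(path) > 1 else node_to_idx[q1]
--         header = f"// {q1} ↔ {q2} via {' → '.join(path)} (SWAPs: {max(len(path) - 2, 0)})"
--         return [header, *swaps, f"CX q[{ctrl}], q[{node_to_idx[path[-1]]}];", *reversed(swaps), ""]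
--
--     return ["OPENQASM 2.0;", "include \"qelib1.inc\";", "qreg q[16];", ""] + \
--         [line for g in gates for line in block(g)]
-- ===== Notes on version B (the rewrite author's own statement) =====
-- stated objective: simpler
-- what changed: B drops A's mutable pos_to_state/state_to_pos occupancy maps entirely (the forward swaps are undone by the reversed swaps, so they are always the identity) and emits each gate's block statelessly from node_to_idx and path_matrix alone, via a per-gate block function flat-mapped over the gates.
import Mathlib
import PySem

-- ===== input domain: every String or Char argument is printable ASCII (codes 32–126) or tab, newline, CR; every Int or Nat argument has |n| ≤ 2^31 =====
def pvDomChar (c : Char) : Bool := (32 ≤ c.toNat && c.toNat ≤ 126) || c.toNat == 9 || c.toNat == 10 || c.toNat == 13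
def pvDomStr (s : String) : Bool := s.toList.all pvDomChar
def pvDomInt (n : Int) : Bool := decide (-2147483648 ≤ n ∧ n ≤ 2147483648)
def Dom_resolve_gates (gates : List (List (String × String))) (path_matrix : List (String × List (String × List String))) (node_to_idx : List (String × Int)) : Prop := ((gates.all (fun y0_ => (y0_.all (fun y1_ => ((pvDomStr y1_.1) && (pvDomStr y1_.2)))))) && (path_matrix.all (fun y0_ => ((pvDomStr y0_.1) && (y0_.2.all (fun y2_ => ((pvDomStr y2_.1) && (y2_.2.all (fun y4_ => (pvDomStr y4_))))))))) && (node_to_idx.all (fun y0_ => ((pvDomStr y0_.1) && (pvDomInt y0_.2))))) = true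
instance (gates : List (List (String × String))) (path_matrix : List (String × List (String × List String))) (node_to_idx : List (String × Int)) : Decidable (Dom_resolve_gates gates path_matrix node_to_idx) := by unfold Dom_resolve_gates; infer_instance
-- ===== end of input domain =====

-- B replaces A's mutable occupancy maps (which always return to the identity) by a
-- stateless per-gate block emitter; objective: simpler.

-- ===== PORT A =====
-- literal port of emit_swap: returns the line and the two updated dicts
def pvEmitSwap (u v : String) (node_to_idx : PySem.Dict String Int)
    (pos_to_state state_to_pos : PySem.Dict String String) :
    String × PySem.Dict String String × PySem.Dict String String :=
  let idx_u := node_to_idx.getD u 0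
  let idx_v := node_to_idx.getD v 0
  let state_u := pos_to_state.getD u ""
  let state_v := pos_to_state.getD v ""
  let pos' := (pos_to_state.insert u state_v).insert v state_u
  let sp' := (state_to_pos.insert state_u v).insert state_v u
  ("SWAP q[" ++ PySem.Int.toStr idx_u ++ "], q[" ++ PySem.Int.toStr idx_v ++ "];", pos', sp')

-- literal port of one iteration of A's gate loop (acc = (lines, pos_to_state, state_to_pos))
def pvGateStep (path_matrix : List (String × List (String × List String)))
    (nti : PySem.Dict String Int)
    (acc : List String × PySem.Dict String String × PySem.Dict String String)
    (gate : List (String × String)) :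
    List String × PySem.Dict String String × PySem.Dict String String :=
  let g := PySem.Dict.ofList gate
  if g.get? "gate" ≠ some "CX" then acc
  else
    match g.get? "q1", g.get? "q2" with
    | some q1, some q2 =>
      match acc.2.2.get? q1, acc.2.2.get? q2 with
      | some start, some ed =>
        let path := (PySem.Dict.ofList ((PySem.Dict.ofList path_matrix).getD start [])).getD ed []
        let lines1 := acc.1 ++ ["// " ++ q1 ++ " ↔ " ++ q2 ++ " via " ++ PySem.Str.join " → " path
          ++ " (SWAPs: " ++ PySem.Int.toStr (max ((path.length : Int) - 2) 0) ++ ")"]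
        let fwd := (PySem.List.pyRange 0 ((path.length : Int) - 2) 1).foldl
          (fun a i =>
            let r := pvEmitSwap (PySem.List.pyGetD path i "") (PySem.List.pyGetD path (i + 1) "") nti a.2.1 a.2.2
            (a.1 ++ [r.1], r.2)) (lines1, acc.2.1, acc.2.2)
        let ctrl_idx := if (1 : Int) < path.length then nti.getD (PySem.List.pyGetD path (-2) "") 0 else nti.getD start 0
        let targ_idx := nti.getD (PySem.List.pyGetD path (-1) "") 0
        let lines2 := fwd.1 ++ ["CX q[" ++ PySem.Int.toStr ctrl_idx ++ "], q[" ++ PySem.Int.toStr targ_idx ++ "];"]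
        let bwd := ((PySem.List.pyRange 0 ((path.length : Int) - 2) 1).reverse).foldl
          (fun a i =>
            let r := pvEmitSwap (PySem.List.pyGetD path i "") (PySem.List.pyGetD path (i + 1) "") nti a.2.1 a.2.2
            (a.1 ++ [r.1], r.2)) (lines2, fwd.2)
        (bwd.1 ++ [""], bwd.2)
      | _, _ => acc
    | _, _ => acc

def resolve_gates (gates : List (List (String × String))) (path_matrix : List (String × List (String × List String))) (node_to_idx : List (String × Int)) : List String :=
  let nti := PySem.Dict.ofList node_to_idx
  let pos0 := nti.keys.foldl (fun d n => d.insert n n) PySem.Dict.empty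
  let st0 := nti.keys.foldl (fun d n => d.insert n n) PySem.Dict.empty
  (gates.foldl (pvGateStep path_matrix nti)
    (["OPENQASM 2.0;", "include \"qelib1.inc\";", "qreg q[16];", ""], pos0, st0)).1

-- ===== PORT B =====
-- port of Source B's stateless per-gate block
def pvBlock (path_matrix : List (String × List (String × List String)))
    (nd : PySem.Dict String Int) (gate : List (String × String)) : List String :=
  let g := PySem.Dict.ofList gate
  if g.get? "gate" ≠ some "CX" then []
  else
    match g.get? "q1", g.get? "q2" with
    | some q1, some q2 =>
      if nd.contains q1 && nd.contains q2 then
        let path := (PySem.Dict.ofList ((PySem.Dict.ofList path_matrix).getD q1 [])).getD q2 []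
        let swaps := (path.zip (PySem.List.slice path (some 1) (some (-1)))).map
          (fun ab => "SWAP q[" ++ PySem.Int.toStr (nd.getD ab.1 0) ++ "], q[" ++ PySem.Int.toStr (nd.getD ab.2 0) ++ "];")
        let ctrl := if (1 : Int) < path.length then nd.getD (PySem.List.pyGetD path (-2) "") 0 else nd.getD q1 0
        let header := "// " ++ q1 ++ " ↔ " ++ q2 ++ " via " ++ PySem.Str.join " → " path
          ++ " (SWAPs: " ++ PySem.Int.toStr (max ((path.length : Int) - 2) 0) ++ ")"
        [header] ++ swaps ++ ["CX q[" ++ PySem.Int.toStr ctrl ++ "], q[" ++ PySem.Int.toStr (nd.getD (PySem.List.pyGetD path (-1) "") 0) ++ "];"]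
          ++ swaps.reverse ++ [""]
      else []
    | _, _ => []

def resolve_gates_alt (gates : List (List (String × String))) (path_matrix : List (String × List (String × List String))) (node_to_idx : List (String × Int)) : List String :=
  let nd := PySem.Dict.ofList node_to_idx
  ["OPENQASM 2.0;", "include \"qelib1.inc\";", "qreg q[16];", ""] ++ gates.flatMap (pvBlock path_matrix nd)

-- ===== PRECONDITION & SPEC =====
-- Pre_ excludes exactly the inputs where A raises (KeyError/IndexError): a CX gate whose
-- endpoints are both in node_to_idx but whose path_matrix entry is missing, empty, or
-- contains a node outside node_to_idx.
def pvPreGate (path_matrix : List (String × List (String × List String)))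
    (nd : PySem.Dict String Int) (gate : List (String × String)) : Bool :=
  let g := PySem.Dict.ofList gate
  if g.get? "gate" ≠ some "CX" then true
  else
    match g.get? "q1", g.get? "q2" with
    | some q1, some q2 =>
      if nd.contains q1 && nd.contains q2 then
        match (PySem.Dict.ofList path_matrix).get? q1 with
        | some row =>
          match (PySem.Dict.ofList row).get? q2 with
          | some path => !path.isEmpty && path.all (fun x => nd.contains x)
          | none => false
        | none => false
      else true
    | _, _ => true

def Pre_resolve_gates (gates : List (List (String × String))) (path_matrix : List (String × List (String × List String))) (node_to_idx : List (String × Int)) : Prop :=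
  gates.all (pvPreGate path_matrix (PySem.Dict.ofList node_to_idx)) = true
instance (gates : List (List (String × String))) (path_matrix : List (String × List (String × List String))) (node_to_idx : List (String × Int)) : Decidable (Pre_resolve_gates gates path_matrix node_to_idx) := by unfold Pre_resolve_gates; infer_instance

def pvWitness_resolve_gates : (List (List (String × String))) × (List (String × List (String × List String))) × (List (String × Int)) :=
  ([[("gate", "CX"), ("q1", "a"), ("q2", "c")], [("gate", "H"), ("q1", "a")]],
   [("a", [("c", ["a", "b", "c"])])],
   [("a", 0), ("b", 1), ("c", 2)])

def Spec_resolve_gates (gates : List (List (String × String))) (path_matrix : List (String × List (String × List String))) (node_to_idx : List (String × Int)) (out : List String) : Prop := out = resolve_gates_alt gates path_matrix node_to_idx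
instance (gates : List (List (String × String))) (path_matrix : List (String × List (String × List String))) (node_to_idx : List (String × Int)) (out : List String) : Decidable (Spec_resolve_gates gates path_matrix node_to_idx out) := by unfold Spec_resolve_gates; infer_instance

-- ===== CLAIM (what is proved, stated in full; the proofs are below) =====
def Claim_equal_resolve_gates : Prop := ∀ (gates : List (List (String × String))) (path_matrix : List (String × List (String × List String))) (node_to_idx : List (String × Int)), Dom_resolve_gates gates path_matrix node_to_idx → Pre_resolve_gates gates path_matrix node_to_idx → Spec_resolve_gates gates path_matrix node_to_idx (resolve_gates gates path_matrix node_to_idx)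


-- ===== LEMMAS AND PROOFS =====

theorem pv_insert_comm {ν : Type} (d : PySem.Dict String ν) (k k' : String) (a b : ν)
    (h : k ≠ k') (hk : d.contains k = true) :
    (d.insert k a).insert k' b = (d.insert k' b).insert k a := by
  apply PySem.Dict.ext
  by_cases hk' : d.contains k' = true
  · rw [PySem.Dict.items_insert_of_contains _ b (by simp [PySem.Dict.contains_insert, hk']),
        PySem.Dict.items_insert_of_contains _ a hk,
        PySem.Dict.items_insert_of_contains _ a (by simp [PySem.Dict.contains_insert, hk]),
        PySem.Dict.items_insert_of_contains _ b hk']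
    simp only [List.map_map]
    apply List.map_congr_left
    intro p _
    simp only [Function.comp_apply]
    by_cases h1 : p.1 = k <;> by_cases h2 : p.1 = k' <;>
      simp_all [beq_iff_eq, h.symm]
  · have hk'2 : d.contains k' = false := by simpa using hk'
    rw [PySem.Dict.items_insert_of_not_contains _ b
          (by simp [PySem.Dict.contains_insert, hk'2, h.symm]),
        PySem.Dict.items_insert_of_contains _ a hk,
        PySem.Dict.items_insert_of_contains _ a (by simp [PySem.Dict.contains_insert, hk]),
        PySem.Dict.items_insert_of_not_contains _ b hk'2]
    simp [List.map_append, beq_iff_eq, h.symm]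

theorem pv_insert_getD_self {ν : Type} (d : PySem.Dict String ν) (k : String) (d0 : ν)
    (hnd : d.keys.Nodup) (hk : d.contains k = true) :
    d.insert k (d.getD k d0) = d := by
  apply PySem.Dict.ext
  rw [PySem.Dict.items_insert_of_contains _ _ hk]
  conv_rhs => rw [← List.map_id d.items]
  apply List.map_congr_left
  rintro ⟨p1, p2⟩ hp
  by_cases h1 : p1 = k
  · subst h1
    have : d.getD p1 d0 = p2 := PySem.Dict.getD_of_mem_items d hp hnd d0
    simp [this]
  · simp [h1]

-- the dict part of emit_swap, and the emitted line
def pvSwapD (u v : String)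
    (ps : PySem.Dict String String × PySem.Dict String String) :
    PySem.Dict String String × PySem.Dict String String :=
  ((ps.1.insert u (ps.1.getD v "")).insert v (ps.1.getD u ""),
   (ps.2.insert (ps.1.getD u "") v).insert (ps.1.getD v "") u)

def pvLine (nti : PySem.Dict String Int) (u v : String) : String :=
  "SWAP q[" ++ PySem.Int.toStr (nti.getD u 0) ++ "], q[" ++ PySem.Int.toStr (nti.getD v 0) ++ "];"

-- invariant: both maps have key set K, values of the first stay in K, and the second inverts the first
def pvInv (K : List String) (ps : PySem.Dict String String × PySem.Dict String String) : Prop :=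
  ps.1.keys = K ∧ ps.2.keys = K ∧ (∀ k ∈ K, ps.1.getD k "" ∈ K) ∧
    ∀ k ∈ K, ps.2.getD (ps.1.getD k "") "" = k

theorem pvSwapD_self {K : List String} (hK : K.Nodup)
    {ps : PySem.Dict String String × PySem.Dict String String} (hInv : pvInv K ps)
    {u : String} (hu : u ∈ K) : pvSwapD u u ps = ps := by
  obtain ⟨p, s⟩ := ps
  obtain ⟨hpk, hsk, hcl, hin⟩ := hInv
  have hcp : p.contains u = true := (PySem.Dict.contains_iff_mem_keys p u).mpr (hpk ▸ hu)
  have hsu : p.getD u "" ∈ K := hcl u hu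
  have hcs : s.contains (p.getD u "") = true :=
    (PySem.Dict.contains_iff_mem_keys s _).mpr (hsk ▸ hsu)
  have h1 : p.insert u (p.getD u "") = p := pv_insert_getD_self p u "" (hpk ▸ hK) hcp
  have h2 : s.insert (p.getD u "") u = s := by
    have h := pv_insert_getD_self s (p.getD u "") "" (hsk ▸ hK) hcs
    rwa [hin u hu] at h
  simp only [pvSwapD, PySem.Dict.insert_insert_self]
  rw [h1, h2]

theorem pvSwapD_cancel {K : List String} (hK : K.Nodup)
    {ps : PySem.Dict String String × PySem.Dict String String} (hInv : pvInv K ps)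
    {u v : String} (hu : u ∈ K) (hv : v ∈ K) :
    pvSwapD u v (pvSwapD u v ps) = ps := by
  by_cases huv : u = v
  · subst huv
    rw [pvSwapD_self hK hInv hu, pvSwapD_self hK hInv hu]
  obtain ⟨p, s⟩ := ps
  obtain ⟨hpk, hsk, hcl, hin⟩ := hInv
  have hpnd : p.keys.Nodup := hpk ▸ hK
  have hsnd : s.keys.Nodup := hsk ▸ hK
  have hcp : ∀ x ∈ K, p.contains x = true := fun x hx =>
    (PySem.Dict.contains_iff_mem_keys p x).mpr (hpk ▸ hx)
  have hcs : ∀ x ∈ K, s.contains x = true := fun x hx =>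
    (PySem.Dict.contains_iff_mem_keys s x).mpr (hsk ▸ hx)
  have hsu : p.getD u "" ∈ K := hcl u hu
  have hsv : p.getD v "" ∈ K := hcl v hv
  have hne : p.getD u "" ≠ p.getD v "" := by
    intro h
    have h1 := hin u hu
    rw [h, hin v hv] at h1
    exact huv h1.symm
  have hpu_id : p.insert u (p.getD u "") = p := pv_insert_getD_self p u "" hpnd (hcp u hu)
  have hpv_id : p.insert v (p.getD v "") = p := pv_insert_getD_self p v "" hpnd (hcp v hv)
  have hsu_id : s.insert (p.getD u "") u = s := by
    have h := pv_insert_getD_self s (p.getD u "") "" hsnd (hcs _ hsu)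
    rwa [hin u hu] at h
  have hsv_id : s.insert (p.getD v "") v = s := by
    have h := pv_insert_getD_self s (p.getD v "") "" hsnd (hcs _ hsv)
    rwa [hin v hv] at h
  have e1 : ((p.insert u (p.getD v "")).insert v (p.getD u "")).getD v "" = p.getD u "" := by
    rw [PySem.Dict.getD_insert]
    simp
  have e2 : ((p.insert u (p.getD v "")).insert v (p.getD u "")).getD u "" = p.getD v "" := by
    rw [PySem.Dict.getD_insert, PySem.Dict.getD_insert]
    simp [huv]
  simp only [pvSwapD, e1, e2]
  rw [Prod.mk.injEq]
  constructor
  · rw [pv_insert_comm (p.insert u (p.getD v "")) v u _ _ (Ne.symm huv)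
        (by rw [PySem.Dict.contains_insert]; simp [hcp v hv]),
      PySem.Dict.insert_insert_self, PySem.Dict.insert_insert_self, hpu_id, hpv_id]
  · rw [PySem.Dict.insert_insert_self,
      pv_insert_comm s (p.getD u "") (p.getD v "") _ _ hne (hcs _ hsu),
      hsv_id, PySem.Dict.insert_insert_self, hsu_id]

theorem pvSwapD_inv {K : List String} (hK : K.Nodup)
    {ps : PySem.Dict String String × PySem.Dict String String} (hInv : pvInv K ps)
    {u v : String} (hu : u ∈ K) (hv : v ∈ K) :
    pvInv K (pvSwapD u v ps) := by
  by_cases huv : u = v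
  · subst huv; rw [pvSwapD_self hK hInv hu]; exact hInv
  obtain ⟨p, s⟩ := ps
  obtain ⟨hpk, hsk, hcl, hin⟩ := hInv
  have hcp : ∀ x ∈ K, p.contains x = true := fun x hx =>
    (PySem.Dict.contains_iff_mem_keys p x).mpr (hpk ▸ hx)
  have hcs : ∀ x ∈ K, s.contains x = true := fun x hx =>
    (PySem.Dict.contains_iff_mem_keys s x).mpr (hsk ▸ hx)
  have hinj : ∀ k1 ∈ K, ∀ k2 ∈ K, p.getD k1 "" = p.getD k2 "" → k1 = k2 := by
    intro k1 h1 k2 h2 h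
    have := hin k1 h1
    rw [h, hin k2 h2] at this
    exact this.symm
  have hne : p.getD u "" ≠ p.getD v "" := fun h => huv (hinj u hu v hv h)
  have hgp : ∀ k, ((p.insert u (p.getD v "")).insert v (p.getD u "")).getD k "" =
      if k = v then p.getD u "" else if k = u then p.getD v "" else p.getD k "" := by
    intro k
    rw [PySem.Dict.getD_insert, PySem.Dict.getD_insert]
  have hgs : ∀ x, ((s.insert (p.getD u "") v).insert (p.getD v "") u).getD x "" =
      if x = p.getD v "" then u else if x = p.getD u "" then v else s.getD x "" := by
    intro x
    rw [PySem.Dict.getD_insert, PySem.Dict.getD_insert]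
  refine ⟨?_, ?_, ?_, ?_⟩
  · simp only [pvSwapD]
    rw [PySem.Dict.keys_insert_of_contains _ _
          (by rw [PySem.Dict.contains_insert]; simp [hcp v hv]),
        PySem.Dict.keys_insert_of_contains _ _ (hcp u hu)]
    exact hpk
  · simp only [pvSwapD]
    rw [PySem.Dict.keys_insert_of_contains _ _
          (by rw [PySem.Dict.contains_insert]; simp [hcs _ (hcl v hv)]),
        PySem.Dict.keys_insert_of_contains _ _ (hcs _ (hcl u hu))]
    exact hsk
  · intro k hk
    simp only [pvSwapD]
    rw [hgp k]
    split_ifs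
    · exact hcl u hu
    · exact hcl v hv
    · exact hcl k hk
  · intro k hk
    simp only [pvSwapD]
    rw [hgp k]
    split_ifs with h1 h2
    · rw [hgs _, if_neg hne, if_pos rfl]
      exact h1.symm
    · rw [hgs _, if_pos rfl]
      exact h2.symm
    · rw [hgs _, if_neg (fun h3 => h1 (hinj k hk v hv h3)),
        if_neg (fun h4 => h2 (hinj k hk u hu h4))]
      exact hin k hk

-- applying a list of swaps and then the reversed list restores the state
theorem pvSwaps_rev_cancel {K : List String} (hK : K.Nodup) :
    ∀ (ts : List (String × String)) (ps : PySem.Dict String String × PySem.Dict String String),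
      pvInv K ps → (∀ uv ∈ ts, uv.1 ∈ K ∧ uv.2 ∈ K) →
      ts.reverse.foldl (fun a uv => pvSwapD uv.1 uv.2 a)
        (ts.foldl (fun a uv => pvSwapD uv.1 uv.2 a) ps) = ps := by
  intro ts
  induction ts with
  | nil => intro ps _ _; rfl
  | cons t ts ih =>
    intro ps hInv hm
    have ht := hm t (by simp)
    have hm' : ∀ uv ∈ ts, uv.1 ∈ K ∧ uv.2 ∈ K := fun uv huv => hm uv (by simp [huv])
    simp only [List.reverse_cons, List.foldl_cons, List.foldl_append, List.foldl_cons, List.foldl_nil]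
    rw [ih _ (pvSwapD_inv hK hInv ht.1 ht.2) hm']
    exact pvSwapD_cancel hK hInv ht.1 ht.2

-- A's line-emitting fold splits into emitted lines ++ a pure dict fold
theorem pvFoldEmit (nti : PySem.Dict String Int) (g h : Int → String) :
    ∀ (is : List Int) (L : List String) (p s : PySem.Dict String String),
      (is.foldl (fun a i =>
          let r := pvEmitSwap (g i) (h i) nti a.2.1 a.2.2
          (a.1 ++ [r.1], r.2)) (L, p, s)) =
      (L ++ is.map (fun i => pvLine nti (g i) (h i)),
        (is.map (fun i => (g i, h i))).foldl (fun a uv => pvSwapD uv.1 uv.2 a) (p, s)) := by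
  intro is
  induction is with
  | nil => intro L p s; simp
  | cons i is ih =>
    intro L p s
    simp only [List.foldl_cons, List.map_cons]
    have h1 := ih (L ++ [pvLine nti (g i) (h i)])
      (pvSwapD (g i) (h i) (p, s)).1 (pvSwapD (g i) (h i) (p, s)).2
    refine Eq.trans h1 ?_
    rw [Prod.mk.injEq]
    exact ⟨by simp, rfl⟩

-- the identity occupancy dict
theorem pvIdD_getD (K : List String) :
    ∀ (d : PySem.Dict String String) (k : String),
      (K.foldl (fun d n => d.insert n n) d).getD k "" =
        if k ∈ K then k else d.getD k "" := by
  induction K with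
  | nil => intro d k; simp
  | cons x K ih =>
    intro d k
    simp only [List.foldl_cons]
    rw [ih]
    by_cases hk : k ∈ K
    · simp [hk]
    · simp only [hk, if_false]
      rw [PySem.Dict.getD_insert]
      by_cases hx : k = x <;> simp [hx, hk]

theorem pvIdD_keys (K : List String) (hK : K.Nodup) :
    (K.foldl (fun d n => d.insert n n) (PySem.Dict.empty : PySem.Dict String String)).keys = K := by
  rw [show (fun (d : PySem.Dict String String) (n : String) => d.insert n n) =
      (fun d x => d.insert x ((fun (_ : PySem.Dict String String) (y : String) => y) d x)) from rfl,
    PySem.Dict.keys_foldl_insert]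
  simp
  exact PySem.Set.ofList_eq_self_of_nodup K hK

theorem pvIdD_inv (K : List String) (hK : K.Nodup) :
    pvInv K (K.foldl (fun d n => d.insert n n) (PySem.Dict.empty : PySem.Dict String String),
             K.foldl (fun d n => d.insert n n) (PySem.Dict.empty : PySem.Dict String String)) := by
  refine ⟨pvIdD_keys K hK, pvIdD_keys K hK, ?_, ?_⟩
  · intro k hk
    simp only [pvIdD_getD, hk, if_true]
  · intro k hk
    simp only [pvIdD_getD, hk, if_true]

theorem pvIdD_get? (K : List String) (hK : K.Nodup) (q : String) :
    (K.foldl (fun d n => d.insert n n) (PySem.Dict.empty : PySem.Dict String String)).get? q =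
      if q ∈ K then some q else none := by
  by_cases hq : q ∈ K
  · have h1 : _ := pvIdD_getD K PySem.Dict.empty q
    have hc : (K.foldl (fun d n => d.insert n n) (PySem.Dict.empty : PySem.Dict String String)).contains q = true := by
      rw [PySem.Dict.contains_iff_mem_keys, pvIdD_keys K hK]; exact hq
    rw [PySem.Dict.contains_eq_isSome_get?] at hc
    obtain ⟨x, hx⟩ := Option.isSome_iff_exists.mp hc
    rw [PySem.Dict.getD_eq_get?_getD, hx] at h1
    simp [hq] at h1
    rw [hx, h1, if_pos hq]
  · rw [if_neg hq]
    rw [PySem.Dict.get?_eq_none_iff_not_mem_keys, pvIdD_keys K hK]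
    exact hq

-- the indexed forward pairs are exactly zip path path[1:-1]
theorem pv_slice_mid (path : List String) :
    PySem.List.slice path (some 1) (some (-1)) = (path.drop 1).take (path.length - 2) := by
  simp [PySem.List.slice, PySem.List.clampIdx]
  cases path with
  | nil => simp
  | cons x xs => simp

theorem pvPairs_eq_zip {α : Type} (path : List String) (f : String → String → α) :
    (PySem.List.pyRange 0 ((path.length : Int) - 2) 1).map
        (fun i => f (PySem.List.pyGetD path i "") (PySem.List.pyGetD path (i + 1) "")) =
      (path.zip (PySem.List.slice path (some 1) (some (-1)))).map (fun ab => f ab.1 ab.2) := by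
  rw [pv_slice_mid]
  apply List.ext_getElem
  · simp [PySem.List.length_pyRange_one]
    omega
  · intro k h1 h2
    simp only [List.getElem_map, PySem.List.getElem_pyRange_one, List.getElem_zip]
    have hk : k < path.length - 2 := by
      have h1' := h1
      simp [PySem.List.length_pyRange_one] at h1'
      omega
    have e1 : PySem.List.pyGetD path (0 + (k : Int)) "" = path[k]'(by omega) := by
      rw [PySem.List.pyGetD_eq_getElem path "" (by omega) (by omega)]
      congr 1
      omega
    have e2 : PySem.List.pyGetD path (0 + (k : Int) + 1) "" = path[k + 1]'(by omega) := by
      rw [PySem.List.pyGetD_eq_getElem path "" (by omega) (by omega)]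
      congr 1
      omega
    rw [e1, e2]
    simp [List.getElem_take]

-- all forward swap pairs lie in the node set
theorem pvPairs_mem (nti : PySem.Dict String Int) (path : List String)
    (hall : path.all (fun x => nti.contains x) = true) :
    ∀ uv ∈ (PySem.List.pyRange 0 ((path.length : Int) - 2) 1).map
        (fun i => (PySem.List.pyGetD path i "", PySem.List.pyGetD path (i + 1) "")),
      uv.1 ∈ nti.keys ∧ uv.2 ∈ nti.keys := by
  intro uv huv
  rw [List.mem_map] at huv
  obtain ⟨i, hi, rfl⟩ := huv
  rw [PySem.List.mem_pyRange_one] at hi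
  have hmem : ∀ j : Int, 0 ≤ j → j < (path.length : Int) →
      PySem.List.pyGetD path j "" ∈ nti.keys := by
    intro j h0 hj
    have : PySem.List.pyGetD path j "" ∈ path := by
      apply PySem.List.pyGetD_mem
      constructor <;> omega
    rw [List.all_eq_true] at hall
    exact (PySem.Dict.contains_iff_mem_keys _ _).mp (hall _ this)
  exact ⟨hmem i hi.1 (by omega), hmem (i + 1) (by omega) (by omega)⟩

-- one gate step from the identity state
theorem pvGateStep_eq (path_matrix : List (String × List (String × List String)))
    (nti : PySem.Dict String Int) (hK : nti.keys.Nodup) (gate : List (String × String))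
    (hPre : pvPreGate path_matrix nti gate = true) (L : List String) :
    pvGateStep path_matrix nti
      (L, nti.keys.foldl (fun d n => d.insert n n) PySem.Dict.empty,
          nti.keys.foldl (fun d n => d.insert n n) PySem.Dict.empty) gate =
    (L ++ pvBlock path_matrix nti gate,
      nti.keys.foldl (fun d n => d.insert n n) PySem.Dict.empty,
      nti.keys.foldl (fun d n => d.insert n n) PySem.Dict.empty) := by
  by_cases hg : (PySem.Dict.ofList gate).get? "gate" = some "CX"
  case neg =>
    simp [pvGateStep, pvBlock, hg]
  rcases hq1 : (PySem.Dict.ofList gate).get? "q1" with _ | q1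
  · simp [pvGateStep, pvBlock, hg, hq1]
  rcases hq2 : (PySem.Dict.ofList gate).get? "q2" with _ | q2
  · simp [pvGateStep, pvBlock, hg, hq1, hq2]
  by_cases hq1K : q1 ∈ nti.keys
  case neg =>
    simp [pvGateStep, pvBlock, hg, hq1, hq2, pvIdD_get? _ hK, hq1K,
      PySem.Dict.contains_eq_decide_mem_keys]
  by_cases hq2K : q2 ∈ nti.keys
  case neg =>
    simp [pvGateStep, pvBlock, hg, hq1, hq2, pvIdD_get? _ hK, hq1K, hq2K,
      PySem.Dict.contains_eq_decide_mem_keys]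
  -- extract the path facts from the precondition
  simp only [pvPreGate] at hPre
  rw [hq1, hq2] at hPre
  simp only [hg, ne_eq, not_true_eq_false, if_false,
    PySem.Dict.contains_eq_decide_mem_keys, hq1K, hq2K, decide_true, Bool.and_self,
    if_true] at hPre
  rcases hrow : (PySem.Dict.ofList path_matrix).get? q1 with _ | row
  · rw [hrow] at hPre; simp at hPre
  simp only [hrow] at hPre
  rcases hpath : (PySem.Dict.ofList row).get? q2 with _ | path
  · simp [hpath] at hPre
  simp only [hpath, Bool.and_eq_true] at hPre
  obtain ⟨hne, hall⟩ := hPre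
  have hgetrow : (PySem.Dict.ofList path_matrix).getD q1 [] = row := by
    rw [PySem.Dict.getD_eq_get?_getD, hrow]; rfl
  have hgetpath : (PySem.Dict.ofList row).getD q2 [] = path := by
    rw [PySem.Dict.getD_eq_get?_getD, hpath]; rfl
  have hall' : path.all (fun x => nti.contains x) = true := by
    simpa [PySem.Dict.contains_eq_decide_mem_keys] using hall
  have hmem := pvPairs_mem nti path hall'
  have hinv := pvIdD_inv nti.keys hK
  -- reduce both sides
  simp only [pvGateStep, pvBlock, hg, ne_eq, not_true_eq_false, if_false, hq1, hq2,
    pvIdD_get? _ hK, hq1K, hq2K, if_true, PySem.Dict.contains_eq_decide_mem_keys,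
    decide_true, Bool.and_self, hgetrow, hgetpath]
  rw [pvFoldEmit nti (fun i => PySem.List.pyGetD path i "")
      (fun i => PySem.List.pyGetD path (i + 1) "")]
  rw [pvFoldEmit nti (fun i => PySem.List.pyGetD path i "")
      (fun i => PySem.List.pyGetD path (i + 1) "")]
  rw [List.map_reverse, List.map_reverse,
    pvSwaps_rev_cancel hK _ _ hinv hmem,
    pvPairs_eq_zip path (pvLine nti)]
  simp [pvLine, List.append_assoc]
theorem pvMainFold (path_matrix : List (String × List (String × List String)))
    (nti : PySem.Dict String Int) (hK : nti.keys.Nodup) :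
    ∀ (gs : List (List (String × String))) (L : List String),
      (∀ g ∈ gs, pvPreGate path_matrix nti g = true) →
      gs.foldl (pvGateStep path_matrix nti)
        (L, nti.keys.foldl (fun d n => d.insert n n) PySem.Dict.empty,
            nti.keys.foldl (fun d n => d.insert n n) PySem.Dict.empty) =
      (L ++ gs.flatMap (pvBlock path_matrix nti),
        nti.keys.foldl (fun d n => d.insert n n) PySem.Dict.empty,
        nti.keys.foldl (fun d n => d.insert n n) PySem.Dict.empty) := by
  intro gs
  induction gs with
  | nil => intro L _; simp
  | cons g gs ih =>
    intro L hp
    simp only [List.foldl_cons, List.flatMap_cons]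
    rw [pvGateStep_eq path_matrix nti hK g (hp g (by simp)) L,
        ih _ (fun g' hg' => hp g' (by simp [hg']))]
    simp [List.append_assoc]

-- ===== VERDICT (by name: the statement is the Claim_ definition above) =====
theorem resolve_gates_spec : Claim_equal_resolve_gates := by
  intro gates path_matrix node_to_idx _ hPre
  unfold Spec_resolve_gates resolve_gates resolve_gates_alt
  simp only []
  rw [pvMainFold path_matrix (PySem.Dict.ofList node_to_idx) (PySem.Dict.nodup_keys_ofList node_to_idx) gates _
      (by
        intro g hg
        have := hPre
        unfold Pre_resolve_gates at this
        rw [List.all_eq_true] at this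
        exact this g hg)]
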